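-- pv_equiv track=rewrite | github.com/danwanderson/broken_shadows | tools/convert_to_yaml.py | int_to_flag
-- ===== SOURCE A (Python) =====
-- def int_to_flag(n: int) -> str:
--     """
--     Convert an integer to a flag letter string
--     (mirrors fwrite_flag in olc_save.c).
--     Bits 0-25  → 'A'-'Z'   (A=2^0, B=2^1, …, Z=2^25)
--     Bits 26+   → 'a'-'f'   (a=2^26, b=2^27, …)
--     Zero       → '0'
--     """
--     if n == 0:
--         return '0'
--     result = []
--     for offset in range(32):
--         if n & (1 << offset):
--             if offset <= 25:
--                 result.append(chr(ord('A') + offset))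
--             else:
--                 result.append(chr(ord('a') + offset - 26))
--     return ''.join(result)
-- ===== SOURCE B (Python) =====
-- def int_to_flag(n: int) -> str:
--     if n == 0:
--         return '0'
--     result = []
--     m = n & 0xFFFFFFFF
--     while m:
--         low = m & -m
--         offset = low.bit_length() - 1
--         if offset <= 25:
--             result.append(chr(ord('A') + offset))
--         else:
--             result.append(chr(ord('a') + offset - 26))
--         m ^= low
--     return ''.join(result)
-- ===== Notes on version B (the rewrite author's own statement) =====
-- stated objective: alternative
-- what changed: Instead of testing every bit position of the word in a fixed-bound for-loop, B masks n to the word width and walks only the set bits of the residual mask (lowest set bit via m & -m, its position via bit_length, cleared with xor), one iteration per set bit.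
import Mathlib
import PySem

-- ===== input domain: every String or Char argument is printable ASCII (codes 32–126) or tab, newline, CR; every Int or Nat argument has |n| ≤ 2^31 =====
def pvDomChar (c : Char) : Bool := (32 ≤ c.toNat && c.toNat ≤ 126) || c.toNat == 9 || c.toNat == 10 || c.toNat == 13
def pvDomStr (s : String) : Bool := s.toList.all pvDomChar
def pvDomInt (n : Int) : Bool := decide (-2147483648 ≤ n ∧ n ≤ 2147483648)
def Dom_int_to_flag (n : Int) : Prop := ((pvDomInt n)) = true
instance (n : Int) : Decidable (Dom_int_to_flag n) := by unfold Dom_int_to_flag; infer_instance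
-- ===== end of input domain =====

-- B changes the loop: instead of testing all 32 bit positions, it walks only the set bits of the
-- 32-bit-masked value, extracting the lowest set bit each time (same return value, different traversal).

-- ===== PORT A =====
def int_to_flag (n : Int) : String :=
  if n = 0 then "0"
  else
    String.ofList ((List.range 32).foldl (fun (result : List Char) (offset : Nat) =>
      if PySem.Int.band n ((1 : Int) <<< offset) ≠ 0 then
        result ++ [if offset ≤ 25 then Char.ofNat (65 + offset) else Char.ofNat (97 + offset - 26)]
      else result) [])

-- ===== PORT B =====
-- the while loop of B: walk the set bits of the residual mask m, lowest first.
-- fuel is only a totality guard: the mask strictly decreases each iteration, so fuel = initial mask suffices.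
def pvLoop : Nat → Nat → List Char
  | 0, _ => []
  | fuel+1, m =>
    if m = 0 then []
    else
      let low : Nat := (PySem.Int.band (m:Int) (-(m:Int))).toNat   -- m & -m (m > 0, so the value is a Nat)
      let offset : Nat := PySem.Int.bitLength (low:Int) - 1         -- low.bit_length() - 1
      (if offset ≤ 25 then Char.ofNat (65 + offset) else Char.ofNat (97 + offset - 26)) ::
        pvLoop fuel (m ^^^ low)                                     -- m ^= low (both non-negative)

def int_to_flag_alt (n : Int) : String :=
  if n = 0 then "0"
  else
    let m : Nat := (PySem.Int.band n 4294967295).toNat   -- m = n & 0xFFFFFFFF (non-negative)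
    String.ofList (pvLoop m m)

-- ===== PRECONDITION & SPEC =====
def Spec_int_to_flag (n : Int) (out : String) : Prop := out = int_to_flag_alt n
instance (n : Int) (out : String) : Decidable (Spec_int_to_flag n out) := by unfold Spec_int_to_flag; infer_instance

-- ===== CLAIM (what is proved, stated in full; the proofs are below) =====
def Claim_equal_int_to_flag : Prop := ∀ (n : Int), Dom_int_to_flag n → Spec_int_to_flag n (int_to_flag n)

-- ===== LEMMAS AND PROOFS =====

-- facts about the loop's low-bit extraction (used by pvLoop_eq below)
theorem pvXor_two_mul (a b : Nat) : (2*a) ^^^ (2*b) = 2 * (a ^^^ b) := by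
  apply Nat.eq_of_testBit_eq
  intro i
  cases i with
  | zero => simp [Nat.testBit_zero]
  | succ i =>
    rw [Nat.testBit_xor, Nat.testBit_succ, Nat.testBit_succ, Nat.testBit_succ,
      (by omega : 2*a/2 = a), (by omega : 2*b/2 = b), (by omega : 2*(a ^^^ b)/2 = a ^^^ b),
      Nat.testBit_xor]

theorem pvAnd_two_mul (q : Nat) : (2*q) &&& (2*q - 1) = 2 * (q &&& (q-1)) ∨ q = 0 := by
  rcases Nat.eq_zero_or_pos q with h | h
  · right; exact h
  · left
    apply Nat.eq_of_testBit_eq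
    intro i
    cases i with
    | zero => simp [Nat.testBit_zero]
    | succ i =>
      rw [Nat.testBit_and, Nat.testBit_succ, Nat.testBit_succ, Nat.testBit_succ,
        (by omega : 2*q/2 = q), (by omega : (2*q-1)/2 = q-1),
        (by omega : 2*(q &&& (q-1))/2 = q &&& (q-1)), Nat.testBit_and]

theorem pvAnd_odd (q : Nat) : (2*q+1) &&& (2*q) = 2*q := by
  apply Nat.eq_of_testBit_eq
  intro i
  cases i with
  | zero => simp [Nat.testBit_zero]
  | succ i =>
    rw [Nat.testBit_and, Nat.testBit_succ, Nat.testBit_succ,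
      (by omega : (2*q+1)/2 = q), (by omega : 2*q/2 = q), Bool.and_self]

theorem pvXor_odd (q : Nat) : (2*q+1) ^^^ 1 = 2*q := by
  apply Nat.eq_of_testBit_eq
  intro i
  cases i with
  | zero => simp [Nat.testBit_zero]; omega
  | succ i =>
    rw [Nat.testBit_xor, Nat.testBit_succ, Nat.testBit_succ, Nat.testBit_succ,
      (by omega : (2*q+1)/2 = q), (by omega : (1:Nat)/2 = 0), (by omega : 2*q/2 = q)]
    simp [Nat.zero_testBit]

-- lowest-set-bit package: m & (m-1) clears the least set bit t, and xor with 2^t does the same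
theorem pvLowbit (m : Nat) (hm : m ≠ 0) :
    ∃ t, (m &&& (m-1)) + 2^t = m ∧ m ^^^ 2^t = m &&& (m-1) ∧
      m.testBit t = true ∧ ∀ k, k < t → m.testBit k = false := by
  induction m using Nat.strong_induction_on with
  | _ m IH =>
    rcases Nat.even_or_odd m with he | ho
    · obtain ⟨q, hq⟩ := he
      have hq' : m = 2*q := by omega
      have hq0 : q ≠ 0 := by omega
      obtain ⟨t, h1, h2, h3, h4⟩ := IH q (by omega) hq0
      refine ⟨t+1, ?_, ?_, ?_, ?_⟩
      · rcases pvAnd_two_mul q with ha | ha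
        · rw [hq', ha, pow_succ]; omega
        · omega
      · rcases pvAnd_two_mul q with ha | ha
        · rw [hq', ha, pow_succ, (by ring : 2^t*2 = 2*2^t), pvXor_two_mul, h2]
        · omega
      · rw [hq', Nat.testBit_succ, (by omega : 2*q/2 = q)]; exact h3
      · intro k hk
        cases k with
        | zero => simp [hq', Nat.testBit_zero]
        | succ k =>
          rw [hq', Nat.testBit_succ, (by omega : 2*q/2 = q)]
          exact h4 k (by omega)
    · obtain ⟨q, hq⟩ := ho
      refine ⟨0, ?_, ?_, ?_, ?_⟩
      · rw [hq, (by omega : 2*q+1-1 = 2*q), pvAnd_odd]; omega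
      · rw [hq, pow_zero, pvXor_odd, (by omega : 2*q+1-1 = 2*q), pvAnd_odd]
      · rw [hq, Nat.testBit_zero]; simp

      · intro k hk; omega

-- value of the Python expression  m & -m  for a positive m (PySem.Int.band branch)
theorem pvBand_self_neg (m : Nat) :
    (PySem.Int.band (m:Int) (-(m:Int))).toNat = m - (m &&& (m-1)) := by
  simp [PySem.Int.band]
  omega


-- the 32-bit mask both programs effectively read
def pvM (n : Int) : Nat := (PySem.Int.band n 4294967295).toNat

theorem pvM_lt (n : Int) : pvM n < 2^32 := by
  unfold pvM
  rw [(by norm_num : (4294967295 : Int) = ((2^32 - 1 : Nat) : Int)), PySem.Int.band]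
  by_cases hn : 0 ≤ n
  · rw [if_pos hn, if_pos (Int.natCast_nonneg _)]
    simp only [Int.toNat_natCast]
    rw [Nat.and_two_pow_sub_one_eq_mod]
    exact Nat.mod_lt _ (by positivity)
  · rw [if_neg hn, if_pos (Int.natCast_nonneg _)]
    simp only [Int.toNat_natCast]
    have := pow_pos (by omega : (0:ℕ) < 2) 32
    omega

-- bits of (2^i - 1) - x  are the complemented bits of x below i
theorem pvSub_testBit (i : Nat) : ∀ x k, x < 2^i → (2^i - 1 - x).testBit k = (decide (k < i) && !(x.testBit k)) := by
  induction i with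
  | zero => intro x k hx; interval_cases x; simp [Nat.zero_testBit]
  | succ i IH =>
    intro x k hx
    cases k with
    | zero =>
      have h2 : 2^(i+1) = 2*2^i := by ring
      have hp := pow_pos (by omega : (0:ℕ) < 2) i
      have hm2 : (2^(i+1) - 1 - x) % 2 = 1 - x % 2 := by omega
      rw [Nat.testBit_zero, Nat.testBit_zero, hm2]
      rcases (by omega : x % 2 = 0 ∨ x % 2 = 1) with h | h <;> simp [h]
    | succ k =>
      rw [Nat.testBit_succ, Nat.testBit_succ]
      have h2 : 2^(i+1) = 2*2^i := by ring
      have := pow_pos (by omega : (0:ℕ) < 2) i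
      have hdiv : (2^(i+1) - 1 - x)/2 = 2^i - 1 - x/2 := by omega
      rw [hdiv, IH (x/2) k (by omega)]
      simp

-- A's per-position test  n & (1 << k) != 0  reads exactly bit k of the masked value
theorem pvCond_iff (n : Int) (k : Nat) (hk : k < 32) :
    (decide (¬ PySem.Int.band n ((1 : Int) <<< k) = 0)) = (pvM n).testBit k := by
  have hk2 := pow_pos (by omega : (0:ℕ) < 2) k
  unfold pvM
  rw [(by simp [Int.shiftLeft_eq] : (1:Int) <<< k = ((2^k : Nat) : Int)),
    (by norm_num : (4294967295 : Int) = ((2^32 - 1 : Nat) : Int)),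
    PySem.Int.band, PySem.Int.band]
  by_cases hn : 0 ≤ n
  · rw [if_pos hn, if_pos (Int.natCast_nonneg _), if_pos hn, if_pos (Int.natCast_nonneg _)]
    simp only [Int.toNat_natCast, Nat.and_two_pow, Nat.and_two_pow_sub_one_eq_mod,
      Nat.testBit_mod_two_pow]
    cases n.toNat.testBit k <;> simp [hk]
  · rw [if_neg hn, if_pos (Int.natCast_nonneg _), if_neg hn, if_pos (Int.natCast_nonneg _)]
    simp only [Int.toNat_natCast]
    have ha : 2^k &&& (-n-1).toNat = ((-n-1).toNat.testBit k).toNat * 2^k := by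
      rw [Nat.and_comm]; exact Nat.and_two_pow _ _
    have hc : 2^32 - 1 &&& (-n-1).toNat = (-n-1).toNat % 2^32 := by
      rw [Nat.and_comm]; exact Nat.and_two_pow_sub_one_eq_mod _ _
    simp only [ha, hc]
    rw [pvSub_testBit 32 ((-n-1).toNat % 2^32) k (Nat.mod_lt _ (by positivity))]
    simp only [Nat.testBit_mod_two_pow]
    cases (-n-1).toNat.testBit k <;> simp [hk]

theorem pvBitLength_pow (t : Nat) : PySem.Int.bitLength (((2^t : Nat) : Int)) = t + 1 := by
  induction t with
  | zero => rw [PySem.Int.bitLength_natCast (by omega : 0 < 2^0)]; simp [PySem.Int.bitLength_zero]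
  | succ t IH =>
    rw [PySem.Int.bitLength_natCast (pow_pos (by omega : (0:ℕ) < 2) _),
      (by rw [pow_succ]; omega : 2^(t+1)/2 = 2^t), IH]

-- peeling the least set bit t off the filtered range
theorem pvFilter_step (N t : Nat) (f g : Nat → Bool) (htN : t < N) (hft : f t = true)
    (hmin : ∀ k, k < t → f k = false) (hg : ∀ k, g k = ((f k).xor (decide (t = k)))) :
    (List.range N).filter f = t :: (List.range N).filter g := by
  have hgt : g t = false := by rw [hg t]; simp [hft]
  have hN : N = t + ((N - t - 1) + 1) := by omega
  rw [hN, List.range_add]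
  rw [List.filter_append, List.filter_append]
  have hnil : ∀ h : Nat → Bool, (∀ k, k < t → h k = false) → (List.range t).filter h = [] := by
    intro h hh
    rw [List.filter_eq_nil_iff]
    intro a ha
    simp [hh a (List.mem_range.mp ha)]
  rw [hnil f hmin, hnil g (by intro k hk; rw [hg k, hmin k hk]; simp; omega)]
  rw [List.range_succ_eq_map, List.map_cons, Nat.add_zero,
    List.filter_cons, List.filter_cons, if_pos hft, if_neg (by simp [hgt])]
  simp only [List.nil_append]
  congr 1
  apply List.filter_congr
  intro y hy
  simp only [List.mem_map, List.mem_range] at hy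
  obtain ⟨x, hx1, hx2⟩ := hy
  obtain ⟨x', hx'⟩ := hx1
  rw [hg y]
  have : t ≠ y := by omega
  simp [this]

-- B's loop enumerates exactly the set bits of m (ascending), mapped to flag letters
theorem pvLoop_eq (fuel : Nat) : ∀ m : Nat, m < 2^32 → m ≤ fuel →
    pvLoop fuel m = ((List.range 32).filter m.testBit).map
      (fun k => if k ≤ 25 then Char.ofNat (65 + k) else Char.ofNat (97 + k - 26)) := by
  induction fuel with
  | zero =>
    intro m _ hf
    rw [(by omega : m = 0)]
    simp [pvLoop, Nat.zero_testBit]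
  | succ fuel IH =>
    intro m hm hf
    by_cases h0 : m = 0
    · subst h0
      simp [pvLoop, Nat.zero_testBit]
    · obtain ⟨t, h1, h2, h3, h4⟩ := pvLowbit m h0
      have ht2 : 0 < 2^t := pow_pos (by omega : (0:ℕ) < 2) t
      have hlow : (PySem.Int.band (m:Int) (-(m:Int))).toNat = 2^t := by
        rw [pvBand_self_neg m]; omega
      have hlt : m ^^^ 2^t < m := by rw [h2]; omega
      have htlt : t < 32 := by
        by_contra hc
        have hle : (2:ℕ)^32 ≤ 2^t := Nat.pow_le_pow_right (by omega) (by omega)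
        have := Nat.testBit_lt_two_pow (by omega : m < 2^t)
        rw [h3] at this
        exact Bool.noConfusion this
      rw [pvLoop]
      rw [if_neg h0]
      simp only [hlow, pvBitLength_pow, Nat.add_sub_cancel]
      rw [IH (m ^^^ 2^t) (by omega) (by omega)]
      rw [pvFilter_step 32 t m.testBit (m ^^^ 2^t).testBit htlt h3 h4
        (by intro k; rw [Nat.testBit_xor, Nat.testBit_two_pow])]
      simp

-- ===== VERDICT (by name: the statement is the Claim_ definition above) =====
theorem int_to_flag_spec : Claim_equal_int_to_flag := by
  intro n _
  unfold Spec_int_to_flag int_to_flag int_to_flag_alt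
  by_cases hn : n = 0
  · simp [hn]
  · rw [if_neg hn, if_neg hn]
    have hfold : (List.range 32).foldl (fun (result : List Char) (offset : Nat) =>
        if PySem.Int.band n ((1 : Int) <<< offset) ≠ 0 then
          result ++ [if offset ≤ 25 then Char.ofNat (65 + offset) else Char.ofNat (97 + offset - 26)]
        else result) [] =
        ((List.range 32).filter (fun (k : Nat) => decide (¬ PySem.Int.band n ((1 : Int) <<< k) = 0))).map
          (fun (k : Nat) => if k ≤ 25 then Char.ofNat (65 + k) else Char.ofNat (97 + k - 26)) := by
      have h := PySem.List.foldl_append_if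
        (fun (k : Nat) => decide (¬ PySem.Int.band n ((1 : Int) <<< k) = 0))
        (fun (k : Nat) => if k ≤ 25 then Char.ofNat (65 + k) else Char.ofNat (97 + k - 26))
        (List.range 32) []
      simpa using h
    rw [hfold]
    rw [List.filter_congr (fun k hk => pvCond_iff n k (List.mem_range.mp hk))]
    rw [show (PySem.Int.band n 4294967295).toNat = pvM n from rfl]
    exact congrArg String.ofList (pvLoop_eq (pvM n) (pvM n) (pvM_lt n) (Nat.le_refl _)).symm
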